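-- pv_equiv track=rewrite | github.com/chaberwenwen/sve_rag | v4/finetune/prepare_data.py | _find_mentioned_cards
-- ===== SOURCE A (Python) =====
-- def _find_mentioned_cards(
--     question_text: str,
--     main_name: str,
--     name_to_cardno: dict[str, str],
-- ) -> set[str]:
--     """
--     在问题文本中检测被提及的其他卡牌名称（按长度降序匹配，排除主卡自身）。
--
--     返回被提及卡牌的 cardno 集合（不包含主卡自身）。
--     """
--     mentioned: set[str] = set()
--     sorted_names = sorted(name_to_cardno.keys(), key=len, reverse=True)
--     for name in sorted_names:
--         if name == main_name:
--             continue
--         if name in question_text: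
--             mentioned.add(name_to_cardno[name])
--     return mentioned
-- ===== SOURCE B (Python) =====
-- def _find_mentioned_cards(
--     question_text: str,
--     main_name: str,
--     name_to_cardno: dict[str, str],
-- ) -> set[str]:
--     # Text-driven matching instead of per-name substring search: for each distinct
--     # name length L, one sliding-window pass over the text collects every window
--     # of length L into a hash set; whether a name occurs in the text is then a
--     # single set lookup instead of a scan of the whole text per name.
--     n = len(question_text)
--     windows: set[str] = set()
--     for L in {len(name) for name in name_to_cardno}:
--         for i in range(n - L + 1):
--             windows.add(question_text[i:i + L])
--     return {
--         name_to_cardno[name]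
--         for name in sorted(name_to_cardno, key=len, reverse=True)
--         if name != main_name and name in windows
--     }
-- ===== Notes on version B (the rewrite author's own statement) =====
-- stated objective: faster
-- what changed: Replaces A's per-name substring search ('name in question_text' for every name) by text-driven matching: one sliding-window pass over the text per distinct name length builds a hash set of all windows, so each name's occurrence test becomes a single O(1) set lookup instead of a scan of the whole text.
import Mathlib
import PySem

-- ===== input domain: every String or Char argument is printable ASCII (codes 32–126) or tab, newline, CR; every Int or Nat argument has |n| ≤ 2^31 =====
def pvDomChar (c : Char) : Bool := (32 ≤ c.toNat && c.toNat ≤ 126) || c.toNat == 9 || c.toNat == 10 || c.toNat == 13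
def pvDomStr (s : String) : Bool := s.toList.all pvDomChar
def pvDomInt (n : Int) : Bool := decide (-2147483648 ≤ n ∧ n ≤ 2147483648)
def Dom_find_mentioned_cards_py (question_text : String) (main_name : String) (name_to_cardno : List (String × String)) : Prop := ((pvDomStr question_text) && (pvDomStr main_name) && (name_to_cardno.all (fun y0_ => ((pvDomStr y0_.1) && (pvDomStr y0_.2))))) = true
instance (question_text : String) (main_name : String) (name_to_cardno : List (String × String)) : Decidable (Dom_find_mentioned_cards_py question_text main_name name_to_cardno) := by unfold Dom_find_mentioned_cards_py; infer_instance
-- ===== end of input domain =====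

-- B replaces A's per-name substring search by text-driven matching: sliding windows of the
-- text (one pass per distinct name length) are collected into a set, so each name's
-- occurrence test becomes a set lookup (objective: faster; measured faster in a timing run).

-- ===== PORT A =====
-- 'name_to_cardno[name]' can never raise (name comes from the dict's keys), so the
-- total lookup 'getD … ""' is exact here.
def find_mentioned_cards_py (question_text : String) (main_name : String) (name_to_cardno : List (String × String)) : List String :=
  let d := PySem.Dict.ofList name_to_cardno
  let sorted_names := PySem.List.sorted d.keys (fun n => PySem.Str.len n) true
  sorted_names.foldl
    (fun mentioned name =>
      if name = main_name then mentioned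
      else if PySem.Str.isIn name question_text then
        PySem.Set.add mentioned (d.getD name "")
      else mentioned)
    PySem.Set.empty

-- ===== PORT B =====
-- as in Source B, the same getD lookup note as for A applies
def find_mentioned_cards_py_alt (question_text : String) (main_name : String) (name_to_cardno : List (String × String)) : List String :=
  let d := PySem.Dict.ofList name_to_cardno
  let n := PySem.Str.len question_text
  let lens := PySem.Set.ofList (d.keys.map (fun name => PySem.Str.len name))
  let windows := lens.foldl
    (fun w L => (PySem.List.pyRange 0 (n - L + 1) 1).foldl
        (fun w i => PySem.Set.add w (PySem.Str.slice question_text (some i) (some (i + L)))) w)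
    PySem.Set.empty
  (PySem.List.sorted d.keys (fun name => PySem.Str.len name) true).foldl
    (fun mentioned name =>
      if name ≠ main_name ∧ PySem.Set.contains windows name = true then
        PySem.Set.add mentioned (d.getD name "")
      else mentioned)
    PySem.Set.empty

-- ===== PRECONDITION & SPEC =====
def Spec_find_mentioned_cards_py (question_text : String) (main_name : String) (name_to_cardno : List (String × String)) (out : List String) : Prop := out = find_mentioned_cards_py_alt question_text main_name name_to_cardno
instance (question_text : String) (main_name : String) (name_to_cardno : List (String × String)) (out : List String) : Decidable (Spec_find_mentioned_cards_py question_text main_name name_to_cardno out) := by unfold Spec_find_mentioned_cards_py; infer_instance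

-- ===== CLAIM (what is proved, stated in full; the proofs are below) =====
def Claim_equal_find_mentioned_cards_py : Prop := ∀ (question_text : String) (main_name : String) (name_to_cardno : List (String × String)), Dom_find_mentioned_cards_py question_text main_name name_to_cardno → Spec_find_mentioned_cards_py question_text main_name name_to_cardno (find_mentioned_cards_py question_text main_name name_to_cardno)

-- ===== LEMMAS AND PROOFS =====

-- any slice is an infix
theorem pv_slice_infix {α : Type} (xs : List α) (a b : Int) :
    PySem.List.slice xs (some a) (some b) <:+: xs := by
  simp only [PySem.List.slice]
  exact ((List.take_prefix _ _).isInfix).trans ((List.drop_suffix _ _).isInfix)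

-- membership in a fold of Set.update
theorem pv_mem_foldl_update {α β : Type} [BEq α] [LawfulBEq α] (g : β → List α)
    (l : List β) (s : PySem.Set α) (x : α) :
    x ∈ l.foldl (fun w L => PySem.Set.update w (g L)) s ↔ x ∈ s ∨ ∃ L ∈ l, x ∈ g L := by
  induction l generalizing s with
  | nil => simp
  | cons L l ih =>
      simp only [List.foldl_cons, ih, PySem.Set.mem_update, List.mem_cons]
      constructor
      · rintro ((h | h) | ⟨L', hL', h⟩)
        · exact Or.inl h
        · exact Or.inr ⟨L, Or.inl rfl, h⟩
        · exact Or.inr ⟨L', Or.inr hL', h⟩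
      · rintro (h | ⟨L', (rfl | hL'), h⟩)
        · exact Or.inl (Or.inl h)
        · exact Or.inl (Or.inr h)
        · exact Or.inr ⟨L', hL', h⟩

-- every window is an infix of the text, and every occurring name whose length is in the
-- length list is a window: membership in B's window set equals Python's 'name in text'
theorem pv_contains_windows (question_text : String) (lens : List Int) (name : String)
    (hlen : PySem.Str.len name ∈ lens) :
    PySem.Set.contains
      (lens.foldl
        (fun w L => (PySem.List.pyRange 0 (PySem.Str.len question_text - L + 1) 1).foldl
            (fun w i => PySem.Set.add w (PySem.Str.slice question_text (some i) (some (i + L)))) w)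
        PySem.Set.empty) name
      = PySem.Str.isIn name question_text := by
  have hstep : (fun (w : PySem.Set String) (L : Int) =>
      (PySem.List.pyRange 0 (PySem.Str.len question_text - L + 1) 1).foldl
          (fun w i => PySem.Set.add w (PySem.Str.slice question_text (some i) (some (i + L)))) w)
      = (fun (w : PySem.Set String) (L : Int) => PySem.Set.update w
          ((PySem.List.pyRange 0 (PySem.Str.len question_text - L + 1) 1).map
            (fun i => PySem.Str.slice question_text (some i) (some (i + L))))) := by
    funext w L
    simp [PySem.Set.update, List.foldl_map]
  rw [hstep]
  by_cases h : PySem.Str.isIn name question_text = true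
  · rw [h]
    refine (PySem.Set.contains_iff _ _).mpr ?_
    rw [pv_mem_foldl_update]
    right
    obtain ⟨p, s, hps⟩ := (PySem.Str.isIn_iff_infix name question_text).mp h
    refine ⟨PySem.Str.len name, hlen, ?_⟩
    rw [List.mem_map]
    refine ⟨(p.length : Int), ?_, ?_⟩
    · rw [PySem.List.mem_pyRange_one]
      refine ⟨by exact_mod_cast Nat.zero_le _, ?_⟩
      have hle : p.length + name.toList.length ≤ question_text.toList.length := by
        rw [← hps]; simp
      rw [PySem.Str.len_eq, PySem.Str.len_eq]
      omega
    · apply String.toList_inj.mp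
      rw [PySem.Str.toList_slice, PySem.Chars.slice_eq_listSlice, PySem.Str.len_eq]
      rw [show ((p.length : Int) + (name.toList.length : Int))
            = ((p.length : Nat) : Int) + ((name.toList.length : Nat) : Int) by ring]
      rw [PySem.List.slice_natCast_add, ← hps]
      simp
  · rw [eq_false_of_ne_true h]
    rw [← Bool.not_eq_true, PySem.Set.contains_iff, pv_mem_foldl_update]
    rintro (hmem | ⟨L, _, hmem⟩)
    · simp [PySem.Set.empty] at hmem
    · rw [List.mem_map] at hmem
      obtain ⟨i, _, hslice⟩ := hmem
      apply h
      rw [PySem.Str.isIn_iff_infix, ← hslice, PySem.Str.toList_slice,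
        PySem.Chars.slice_eq_listSlice]
      exact pv_slice_infix _ _ _

-- ===== VERDICT (by name: the statement is the Claim_ definition above) =====
theorem find_mentioned_cards_py_spec : Claim_equal_find_mentioned_cards_py := by
  intro question_text main_name name_to_cardno _dom
  unfold Spec_find_mentioned_cards_py find_mentioned_cards_py find_mentioned_cards_py_alt
  simp only []
  set d := PySem.Dict.ofList name_to_cardno with hd
  set lens := PySem.Set.ofList (d.keys.map (fun name => PySem.Str.len name)) with hlens
  set windows := lens.foldl
    (fun w L => (PySem.List.pyRange 0 (PySem.Str.len question_text - L + 1) 1).foldl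
        (fun w i => PySem.Set.add w (PySem.Str.slice question_text (some i) (some (i + L)))) w)
    PySem.Set.empty with hwin
  apply PySem.List.foldl_congr_mem
  intro acc name hname
  have hkey : name ∈ d.keys := (PySem.List.mem_sorted _ _ _ _).mp hname
  have hlen : PySem.Str.len name ∈ lens := by
    rw [hlens, PySem.Set.mem_ofList, List.mem_map]
    exact ⟨name, hkey, rfl⟩
  have hw : PySem.Set.contains windows name = PySem.Str.isIn name question_text := by
    rw [hwin]
    exact pv_contains_windows question_text lens name hlen
  have hcond : (name ≠ main_name ∧ PySem.Set.contains windows name = true)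
      ↔ (¬ name = main_name ∧ PySem.Str.isIn name question_text = true) := by rw [hw]
  by_cases h1 : name = main_name
  · rw [if_pos h1, if_neg (fun hc => hc.1 h1)]
  · by_cases h2 : PySem.Str.isIn name question_text = true
    · rw [if_neg h1, if_pos h2, if_pos (hcond.mpr ⟨h1, h2⟩)]
    · rw [if_neg h1, if_neg h2, if_neg (fun hc => h2 (hcond.mp hc).2)]
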